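-- pv_equiv track=rewrite | github.com/MrBrantCode/unitest_baseline | mut_generate/mist_train_taco/taco_18577/solution.py | find_max_compression_factor
-- ===== SOURCE A (Python) =====
-- def find_max_compression_factor(n, matrix_hex):
--     hex2bin = [''] * 256
--     hex2bin[ord('0')] = '0000'
--     hex2bin[ord('1')] = '0001'
--     hex2bin[ord('2')] = '0010'
--     hex2bin[ord('3')] = '0011'
--     hex2bin[ord('4')] = '0100'
--     hex2bin[ord('5')] = '0101'
--     hex2bin[ord('6')] = '0110'
--     hex2bin[ord('7')] = '0111'
--     hex2bin[ord('8')] = '1000'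
--     hex2bin[ord('9')] = '1001'
--     hex2bin[ord('A')] = '1010'
--     hex2bin[ord('B')] = '1011'
--     hex2bin[ord('C')] = '1100'
--     hex2bin[ord('D')] = '1101'
--     hex2bin[ord('E')] = '1110'
--     hex2bin[ord('F')] = '1111'
--
--     buckets = [0] * (n + 1)
--     prev = ''
--     count = 0
--
--     for i in range(n):
--         if matrix_hex[i] == prev:
--             count += 1
--         else:
--             buckets[count] += 1
--             count = 1
--             prev = matrix_hex[i]
--             prev_c = ''
--             counter = 0
--             for hexx in prev:
--                 for c in hex2bin[ord(hexx)]: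
--                     if c == prev_c:
--                         counter += 1
--                     else:
--                         buckets[counter] += 1
--                         counter = 1
--                         prev_c = c
--             buckets[counter] += 1
--
--     buckets[count] += 1
--     x = 0
--     for i in range(1, n + 1):
--         if buckets[i]:
--             while i:
--                 i, x = x % i, i
--
--     return x
-- ===== SOURCE B (Python) =====
-- from itertools import islice
-- from math import gcd
--
--
-- def find_max_compression_factor(n, matrix_hex):
--     NIB = {'0': '0000', '1': '0001', '2': '0010', '3': '0011',
--            '4': '0100', '5': '0101', '6': '0110', '7': '0111',
--            '8': '1000', '9': '1001', 'A': '1010', 'B': '1011',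
--            'C': '1100', 'D': '1101', 'E': '1110', 'F': '1111'}
--
--     # gcd of run lengths == gcd of the change positions (and the total length),
--     # since run lengths are consecutive differences of those positions.
--     x = gcd(0, n)
--     for i in range(1, n):
--         if matrix_hex[i] != matrix_hex[i - 1]:
--             x = gcd(x, i)
--     # horizontal part: each distinct one of the n rows once (gcd absorbs repeats)
--     for row in set(islice(matrix_hex, n)):
--         bits = ''.join(NIB.get(c, '') for c in row)
--         x = gcd(x, len(bits))
--         for i in range(1, len(bits)):
--             if bits[i] != bits[i - 1]:
--                 x = gcd(x, i)
--     return x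
-- ===== Notes on version B (the rewrite author's own statement) =====
-- stated objective: alternative
-- what changed: B never extracts run lengths at all: it takes the gcd of the CHANGE POSITIONS (indices where the value differs from its predecessor) plus the total length, for the row sequence and for the bit expansion of each DISTINCT row (deduplicated via a set, combined with math.gcd), which equals the gcd of the run lengths because run lengths are consecutive differences of those positions; A instead run-length-encodes into an occupancy bucket array indexed by run length and gcds the nonzero bucket indices with an inline Euclid loop.
import Mathlib
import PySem

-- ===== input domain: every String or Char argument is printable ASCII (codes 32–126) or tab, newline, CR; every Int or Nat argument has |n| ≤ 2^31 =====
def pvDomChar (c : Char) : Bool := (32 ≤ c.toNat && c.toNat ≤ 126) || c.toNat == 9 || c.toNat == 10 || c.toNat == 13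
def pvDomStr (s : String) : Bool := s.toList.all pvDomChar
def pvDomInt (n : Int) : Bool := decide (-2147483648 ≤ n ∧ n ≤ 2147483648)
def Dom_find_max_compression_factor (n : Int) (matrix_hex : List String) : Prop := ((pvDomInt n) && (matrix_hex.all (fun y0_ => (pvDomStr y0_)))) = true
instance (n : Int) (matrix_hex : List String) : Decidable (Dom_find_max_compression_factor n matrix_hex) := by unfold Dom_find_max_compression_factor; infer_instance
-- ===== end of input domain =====

-- B never extracts run lengths: it gcds the CHANGE POSITIONS (indices where a value differs
-- from its predecessor) together with the total length — for the row sequence and for the bit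
-- expansion of each DISTINCT row (deduplicated via a set) — which equals the gcd of the run
-- lengths because run lengths are consecutive differences of those positions.  A instead
-- run-length-encodes into an occupancy bucket array indexed by run length and gcds the nonzero
-- bucket indices.  Same cost; alternative algorithm.  Equivalence is proved on Pre_ (exactly
-- the inputs where A returns).

-- ===== PORT A =====

-- hex2bin = ['']*256 with the 16 uppercase hex digits set (A builds this table once).
def pvHex2bin : List String :=
  ((((((((((((((((List.replicate 256 "").set 48 "0000").set 49 "0001").set 50 "0010").set
    51 "0011").set 52 "0100").set 53 "0101").set 54 "0110").set 55 "0111").set 56 "1000").set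
    57 "1001").set 65 "1010").set 66 "1011").set 67 "1100").set 68 "1101").set 69 "1110").set
    70 "1111"

-- buckets[k] += 1 (all indices that occur in an admitted run are nonnegative and in range;
-- Pre_ excludes the runs for which Python would raise IndexError here).
def pvBump (b : List Int) (k : Nat) : List Int := b.set k (b.getD k 0 + 1)

-- inner loop body: one bit character c against state (buckets, prev_c, counter);
-- Python's prev_c = '' (never equal to a 1-char string) is modelled as `none`.
def pvStepBit (st : List Int × Option Char × Int) (c : Char) : List Int × Option Char × Int :=
  if (some c : Option Char) = st.2.1 then (st.1, st.2.1, st.2.2 + 1)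
  else (pvBump st.1 st.2.2.toNat, some c, 1)

-- 'for hexx in prev: for c in hex2bin[ord(hexx)]: …' starting from prev_c = '', counter = 0
def pvScanRow (b : List Int) (s : String) : List Int × Option Char × Int :=
  s.toList.foldl
    (fun st hexx => ((PySem.List.pyGetD pvHex2bin (hexx.toNat : Int) "").toList).foldl pvStepBit st)
    (b, none, 0)

-- one iteration of A's main loop, state (buckets, prev, count)
def pvStepRow (matrix_hex : List String) (st : List Int × String × Int) (i : Int) :
    List Int × String × Int :=
  let row := PySem.List.pyGetD matrix_hex i ""
  if row = st.2.1 then (st.1, st.2.1, st.2.2 + 1)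
  else
    let r := pvScanRow (pvBump st.1 st.2.2.toNat) row
    (pvBump r.1 r.2.2.toNat, row, 1)

-- termination measure for the two hand-written gcd loops
theorem pvMod_natAbs_lt (x i : Int) (h : i ≠ 0) :
    (PySem.Int.mod x i).natAbs < i.natAbs := by
  rcases lt_or_gt_of_ne h with hneg | hpos
  · have := PySem.Int.mod_neg_bounds x hneg
    omega
  · have h1 := PySem.Int.mod_nonneg x hpos
    have h2 := PySem.Int.mod_lt x hpos
    omega

-- 'while i: i, x = x % i, i' then the final value of x
def pvWhileGcd (i x : Int) : Int :=
  if h : i = 0 then x else pvWhileGcd (PySem.Int.mod x i) i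
termination_by i.natAbs
decreasing_by exact pvMod_natAbs_lt x i h

def find_max_compression_factor (n : Int) (matrix_hex : List String) : Int :=
  let st := (PySem.List.pyRange 0 n 1).foldl (pvStepRow matrix_hex)
              (List.replicate (n + 1).toNat 0, "", 0)
  let buckets := pvBump st.1 st.2.2.toNat
  (PySem.List.pyRange 1 (n + 1) 1).foldl
    (fun x i => if PySem.List.pyGetD buckets i 0 ≠ 0 then pvWhileGcd i x else x) 0

-- ===== PORT B =====

-- NIB of Source B
def pvTable : PySem.Dict Char String :=
  PySem.Dict.ofList [('0', "0000"), ('1', "0001"), ('2', "0010"), ('3', "0011"),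
    ('4', "0100"), ('5', "0101"), ('6', "0110"), ('7', "0111"),
    ('8', "1000"), ('9', "1001"), ('A', "1010"), ('B', "1011"),
    ('C', "1100"), ('D', "1101"), ('E', "1110"), ('F', "1111")]

-- math.gcd of Source B (Python's math.gcd(a, b) is the nonnegative gcd of |a|, |b|)
def pvGcd (a b : Int) : Int := (Int.gcd a b : Int)

-- bits = ''.join(NIB.get(c, '') for c in row)  (kept as the list of characters)
def pvBitsB (s : String) : List Char :=
  s.toList.flatMap (fun ch => (PySem.Dict.getD pvTable ch "").toList)

-- set(islice(matrix_hex, n)): exact for 0 ≤ n (for negative n Python B raises ValueError,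
-- which Pre_ excludes)
def find_max_compression_factor_alt (n : Int) (matrix_hex : List String) : Int :=
  let x :=
    (PySem.List.pyRange 1 n 1).foldl
      (fun x i =>
        if PySem.List.pyGetD matrix_hex i "" ≠ PySem.List.pyGetD matrix_hex (i - 1) "" then
          pvGcd x i
        else x)
      (pvGcd 0 n)
  (PySem.Set.ofList (matrix_hex.take n.toNat)).foldl
    (fun x row =>
      (PySem.List.pyRange 1 ((pvBitsB row).length : Int) 1).foldl
        (fun x i =>
          if PySem.List.pyGetD (pvBitsB row) i ' ' ≠ PySem.List.pyGetD (pvBitsB row) (i - 1) ' '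
          then pvGcd x i else x)
        (pvGcd x ((pvBitsB row).length : Int)))
    x

-- ===== PRECONDITION & SPEC =====

-- shared, port-independent vocabulary used only to STATE the precondition:
-- the 4-bit expansion of a character (uppercase hex digits only) …
def pvNibNat (k : Nat) : String :=
  if k = 48 then "0000" else if k = 49 then "0001" else if k = 50 then "0010"
  else if k = 51 then "0011" else if k = 52 then "0100" else if k = 53 then "0101"
  else if k = 54 then "0110" else if k = 55 then "0111" else if k = 56 then "1000"
  else if k = 57 then "1001" else if k = 65 then "1010" else if k = 66 then "1011"
  else if k = 67 then "1100" else if k = 68 then "1101" else if k = 69 then "1110"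
  else if k = 70 then "1111" else ""

def pvSpecBits (s : String) : List Char :=
  s.toList.flatMap (fun c => (pvNibNat c.toNat).toList)

-- … and the maximal-run decomposition of a list: (representative, length) per run
-- (structural accumulator form, so that `decide` can evaluate Pre_ on literals)
def pvCRunsGrow {α : Type} [DecidableEq α] : α → Nat → List α → List (α × Nat)
  | cur, cnt, [] => [(cur, cnt)]
  | cur, cnt, b :: t =>
      if b = cur then pvCRunsGrow cur (cnt + 1) t else (cur, cnt) :: pvCRunsGrow b 1 t

def pvCRuns {α : Type} [DecidableEq α] : List α → List (α × Nat)
  | [] => []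
  | a :: t => pvCRunsGrow a 1 t

def pvRunLens {α : Type} [DecidableEq α] (l : List α) : List Nat :=
  (pvCRuns l).map (fun p => p.2)

-- Pre_ holds exactly where the Python A returns: it excludes n < 0 and n > len(matrix_hex)
-- (IndexError on matrix_hex[i] / buckets[0]) and rows among the first n whose bit expansion
-- has a run of equal bits longer than n (IndexError on buckets[counter]); A raises on all
-- excluded inputs and returns on all admitted ones.
def Pre_find_max_compression_factor (n : Int) (matrix_hex : List String) : Prop :=
  0 ≤ n ∧ n ≤ matrix_hex.length ∧
    ∀ s ∈ matrix_hex.take n.toNat, ∀ r ∈ pvRunLens (pvSpecBits s), (r : Int) ≤ n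

instance (n : Int) (matrix_hex : List String) :
    Decidable (Pre_find_max_compression_factor n matrix_hex) := by
  unfold Pre_find_max_compression_factor; infer_instance

def pvWitness_find_max_compression_factor : Int × List String := (3, ["A", "A", "3"])

def Spec_find_max_compression_factor (n : Int) (matrix_hex : List String) (out : Int) : Prop :=
  out = find_max_compression_factor_alt n matrix_hex
instance (n : Int) (matrix_hex : List String) (out : Int) :
    Decidable (Spec_find_max_compression_factor n matrix_hex out) := by
  unfold Spec_find_max_compression_factor; infer_instance

-- ===== CLAIM (what is proved, stated in full; the proofs are below) =====
def Claim_equal_find_max_compression_factor : Prop :=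
  ∀ (n : Int) (matrix_hex : List String), Dom_find_max_compression_factor n matrix_hex →
    Pre_find_max_compression_factor n matrix_hex →
      Spec_find_max_compression_factor n matrix_hex (find_max_compression_factor n matrix_hex)

-- ===== LEMMAS AND PROOFS =====

-- ---------- generic gcd facts ----------

theorem pvGcd_emod (x i : Int) : Int.gcd i (x % i) = Int.gcd x i := by
  apply Nat.dvd_antisymm
  · apply Int.dvd_gcd
    · have hsum := dvd_add (Int.gcd_dvd_right (a := i) (b := x % i))
        ((Int.gcd_dvd_left (a := i) (b := x % i)).mul_right (x / i))
      rw [show x % i + i * (x / i) = x from by rw [Int.emod_def]; ring] at hsum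
      exact hsum
    · exact Int.gcd_dvd_left (a := i) (b := x % i)
  · apply Int.dvd_gcd
    · exact Int.gcd_dvd_right (a := x) (b := i)
    · rw [Int.emod_def x i]
      exact dvd_sub (Int.gcd_dvd_left (a := x) (b := i))
        ((Int.gcd_dvd_right (a := x) (b := i)).mul_right _)

theorem pvWhileGcd_eq (i x : Int) (hx : 0 ≤ x) (hi : 0 ≤ i) :
    pvWhileGcd i x = (Int.gcd x i : Int) := by
  revert hx hi
  induction i, x using pvWhileGcd.induct with
  | case1 x => intro hx _; simp [pvWhileGcd, Int.natAbs_of_nonneg hx]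
  | case2 i x h ih =>
    intro hx hi
    have hipos : 0 < i := lt_of_le_of_ne hi (Ne.symm h)
    rw [pvWhileGcd, dif_neg h]
    rw [ih hi (PySem.Int.mod_nonneg x hipos)]
    rw [PySem.Int.mod_eq_emod_of_pos hipos, pvGcd_emod]


theorem pvDvd_foldl_gcd (L : List Nat) : ∀ (a d : Nat),
    (d ∣ L.foldl Nat.gcd a ↔ d ∣ a ∧ ∀ x ∈ L, d ∣ x) := by
  induction L with
  | nil => intro a d; simp
  | cons x t ih =>
    intro a d
    rw [List.foldl_cons, ih, Nat.dvd_gcd_iff]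
    constructor
    · rintro ⟨⟨h1, h2⟩, h3⟩
      exact ⟨h1, fun y hy => by rcases List.mem_cons.mp hy with rfl | hy; exacts [h2, h3 y hy]⟩
    · rintro ⟨h1, h2⟩
      exact ⟨⟨h1, h2 x List.mem_cons_self⟩, fun y hy => h2 y (List.mem_cons_of_mem _ hy)⟩

theorem pvFoldl_whileGcd_filter (P : Int → Prop) [DecidablePred P] (L : List Nat) : ∀ g : Nat,
    (L.map (fun k : Nat => (k : Int))).foldl
        (fun x v => if P v then pvWhileGcd v x else x) (g : Int)
      = (((L.filter (fun k : Nat => decide (P (↑k : Int)))).foldl Nat.gcd g : Nat) : Int) := by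
  induction L with
  | nil => intro g; simp
  | cons k t ih =>
    intro g
    rw [List.map_cons, List.foldl_cons, List.filter_cons]
    by_cases hP : P (↑k : Int)
    · rw [if_pos hP]
      simp only [decide_eq_true hP, if_true]
      rw [pvWhileGcd_eq _ _ (by positivity) (by positivity), Int.gcd_natCast_natCast,
        List.foldl_cons]
      exact ih (Nat.gcd g k)
    · rw [if_neg hP]
      simp only [decide_eq_false hP, Bool.false_eq_true, if_false]
      exact ih g

theorem pvFoldl_gcd_if (P : Int → Prop) [DecidablePred P] (L : List Nat) : ∀ g : Nat,
    (L.map (fun k : Nat => (k : Int))).foldl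
        (fun x v => if P v then pvGcd x v else x) (g : Int)
      = (((L.filter (fun k : Nat => decide (P (↑k : Int)))).foldl Nat.gcd g : Nat) : Int) := by
  induction L with
  | nil => intro g; simp
  | cons k t ih =>
    intro g
    rw [List.map_cons, List.foldl_cons, List.filter_cons]
    by_cases hP : P (↑k : Int)
    · rw [if_pos hP]
      simp only [decide_eq_true hP, if_true]
      rw [show pvGcd (g : Int) (k : Int) = ((Nat.gcd g k : Nat) : Int) from by
          simp [pvGcd, Int.gcd_natCast_natCast], List.foldl_cons]
      exact ih (Nat.gcd g k)
    · rw [if_neg hP]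
      simp only [decide_eq_false hP, Bool.false_eq_true, if_false]
      exact ih g

-- ---------- buckets ----------

def pvGood (b : List Int) : Prop := ∀ j, 0 ≤ b.getD j 0

theorem pvGetD_replicate_zero (m j : Nat) : (List.replicate m (0 : Int)).getD j 0 = 0 := by
  rcases lt_or_ge j m with h | h
  · exact List.getD_replicate _ (by simpa using h)
  · rw [List.getD_eq_getElem?_getD, List.getElem?_eq_none (by simpa using h)]
    rfl

theorem pvGood_replicate (m : Nat) : pvGood (List.replicate m (0 : Int)) := by
  intro j; rw [pvGetD_replicate_zero]

theorem pvLength_pvBump (b : List Int) (k : Nat) : (pvBump b k).length = b.length := by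
  simp [pvBump]

theorem pvGetD_pvBump (b : List Int) (k j : Nat) :
    (pvBump b k).getD j 0 = if k = j ∧ k < b.length then b.getD j 0 + 1 else b.getD j 0 := by
  simp only [pvBump, List.getD_eq_getElem?_getD, List.getElem?_set]
  split_ifs with h1 h2 h3 h3 <;> simp_all <;> omega

theorem pvGood_pvBump (b : List Int) (k : Nat) (h : pvGood b) : pvGood (pvBump b k) := by
  intro j
  rw [pvGetD_pvBump]
  have := h j
  split_ifs <;> omega

theorem pvBump_ne_zero (b : List Int) (k j : Nat) (h : pvGood b) :
    ((pvBump b k).getD j 0 ≠ 0 ↔ b.getD j 0 ≠ 0 ∨ (j = k ∧ k < b.length)) := by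
  rw [pvGetD_pvBump]
  have := h j
  split_ifs with hc
  · constructor
    · intro _; right; exact ⟨hc.1.symm, hc.2⟩
    · intro _; omega
  · constructor
    · intro hb; left; exact hb
    · rintro (hb | ⟨rfl, hlt⟩)
      · exact hb
      · exact absurd ⟨rfl, hlt⟩ hc

-- ---------- run decompositions ----------

-- the list of run lengths A's scan records from state (prev, cnt) on the rest of the input
def pvTail {α : Type} [DecidableEq α] (prev : α) (cnt : Nat) : List α → List Nat
  | [] => [cnt]
  | a :: t => if a = prev then pvTail prev (cnt + 1) t else cnt :: pvTail a 1 t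

-- the representatives A expands from state prev on the rest of the input
def pvReps (prev : String) : List String → List String
  | [] => []
  | a :: t => if a = prev then pvReps prev t else a :: pvReps a t

theorem pvCRuns_nil {α : Type} [DecidableEq α] : pvCRuns ([] : List α) = [] := rfl

theorem pvCRunsGrow_eq {α : Type} [DecidableEq α] (l : List α) : ∀ (cur : α) (cnt : Nat),
    pvCRunsGrow cur cnt l
      = (cur, cnt + (l.takeWhile (fun x => x = cur)).length)
          :: pvCRuns (l.dropWhile (fun x => x = cur)) := by
  induction l with
  | nil => intro cur cnt; simp [pvCRunsGrow, pvCRuns]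
  | cons b t ih =>
    intro cur cnt
    by_cases hb : b = cur
    · subst hb
      rw [pvCRunsGrow, if_pos rfl, ih b (cnt + 1)]
      rw [List.takeWhile_cons_of_pos (by simp), List.dropWhile_cons_of_pos (by simp)]
      simp only [List.length_cons]
      congr 2
      omega
    · rw [pvCRunsGrow, if_neg hb]
      rw [List.takeWhile_cons_of_neg (by simpa using hb),
        List.dropWhile_cons_of_neg (by simpa using hb)]
      simp [pvCRuns]

theorem pvCRuns_cons {α : Type} [DecidableEq α] (a : α) (t : List α) :
    pvCRuns (a :: t)
      = (a, 1 + (t.takeWhile (fun x => x = a)).length)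
          :: pvCRuns (t.dropWhile (fun x => x = a)) := by
  show pvCRunsGrow a 1 t = _
  exact pvCRunsGrow_eq t a 1

-- the recursion shape of the run decomposition, as an induction principle
theorem pvCRuns_induct {α : Type} [DecidableEq α] {P : List α → Prop} (l : List α)
    (h0 : P ([] : List α))
    (h1 : ∀ (a : α) (t : List α), P (t.dropWhile (fun x => x = a)) → P (a :: t)) :
    P l := by
  have key : ∀ (n : Nat) (l : List α), l.length ≤ n → P l := by
    intro n
    induction n with
    | zero =>
      intro l hl
      cases l with
      | nil => exact h0
      | cons a t => simp at hl
    | succ n ih =>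
      intro l hl
      cases l with
      | nil => exact h0
      | cons a t =>
        refine h1 a t (ih _ ?_)
        have := List.length_dropWhile_le (fun x => decide (x = a)) t
        simp at hl ⊢
        omega
  exact key l.length l le_rfl

theorem pvTail_nil {α : Type} [DecidableEq α] (prev : α) (cnt : Nat) :
    pvTail prev cnt [] = [cnt] := rfl

theorem pvTail_cons {α : Type} [DecidableEq α] (prev a : α) (cnt : Nat) (t : List α) :
    pvTail prev cnt (a :: t)
      = if a = prev then pvTail prev (cnt + 1) t else cnt :: pvTail a 1 t := rfl

theorem pvReps_cons (prev a : String) (t : List String) :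
    pvReps prev (a :: t) = if a = prev then pvReps prev t else a :: pvReps a t := rfl

theorem pvTail_eq {α : Type} [DecidableEq α] (l : List α) : ∀ (prev : α) (cnt : Nat),
    pvTail prev cnt l
      = (cnt + (l.takeWhile (fun x => x = prev)).length)
          :: pvRunLens (l.dropWhile (fun x => x = prev)) := by
  induction l with
  | nil => intro prev cnt; simp [pvTail, pvRunLens, pvCRuns]
  | cons a t ih =>
    intro prev cnt
    by_cases ha : a = prev
    · subst ha
      rw [pvTail, if_pos rfl, ih a (cnt + 1)]
      rw [List.takeWhile_cons_of_pos (by simp), List.dropWhile_cons_of_pos (by simp)]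
      simp only [List.length_cons]
      congr 1
      omega
    · rw [pvTail, if_neg ha, ih a 1]
      rw [List.takeWhile_cons_of_neg (by simpa using ha),
        List.dropWhile_cons_of_neg (by simpa using ha)]
      simp only [List.length_nil, Nat.add_zero]
      simp only [pvRunLens, pvCRuns_cons]
      simp [pvRunLens]

theorem pvRunLens_pos {α : Type} [DecidableEq α] (l : List α) :
    ∀ k ∈ pvRunLens l, 1 ≤ k := by
  simp only [pvRunLens]
  induction l using pvCRuns_induct with
  | h0 => simp [pvCRuns]
  | h1 a t ih =>
    intro k hk
    rw [pvCRuns_cons] at hk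
    simp only [List.map_cons, List.mem_cons] at hk
    rcases hk with rfl | hk
    · omega
    · exact ih k (by simpa using hk)

theorem pvRunLens_le_length {α : Type} [DecidableEq α] (l : List α) :
    ∀ k ∈ pvRunLens l, k ≤ l.length := by
  simp only [pvRunLens]
  induction l using pvCRuns_induct with
  | h0 => simp [pvCRuns]
  | h1 a t ih =>
    intro k hk
    rw [pvCRuns_cons] at hk
    simp only [List.map_cons, List.mem_cons] at hk
    have htw := (List.takeWhile_sublist (l := t) (fun x => decide (x = a))).length_le
    have hdw := (List.dropWhile_sublist (l := t) (fun x => decide (x = a))).length_le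
    rcases hk with rfl | hk
    · simp only [List.length_cons]; omega
    · have := ih k (by simpa using hk)
      simp only [List.length_cons]; omega

theorem pvCRuns_map_inj {α β : Type} [DecidableEq α] [DecidableEq β]
    (f : α → β) (hf : Function.Injective f) (l : List α) :
    pvCRuns (l.map f) = (pvCRuns l).map (fun p => (f p.1, p.2)) := by
  induction l using pvCRuns_induct with
  | h0 => simp [pvCRuns]
  | h1 a t ih =>
    have hpred : ((fun x => decide (x = f a)) ∘ f) = (fun x => decide (x = a)) := by
      funext x; simp [hf.eq_iff]
    rw [List.map_cons, pvCRuns_cons, pvCRuns_cons]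
    rw [List.takeWhile_map, List.dropWhile_map, hpred]
    rw [ih]
    simp [List.map_cons]

theorem pvRunLens_map_inj {α β : Type} [DecidableEq α] [DecidableEq β]
    (f : α → β) (hf : Function.Injective f) (l : List α) :
    pvRunLens (l.map f) = pvRunLens l := by
  simp only [pvRunLens, pvCRuns_map_inj f hf, List.map_map]
  rfl

theorem pvMem_pvTail_empty_str (rows : List String) (j : Nat) (hj : 1 ≤ j) :
    (j ∈ pvTail "" 0 rows ↔ j ∈ pvRunLens rows) := by
  rw [pvTail_eq]
  cases rows with
  | nil => simp [pvRunLens, pvCRuns]; omega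
  | cons a t =>
    by_cases ha : a = ""
    · subst ha
      rw [List.takeWhile_cons_of_pos (by simp), List.dropWhile_cons_of_pos (by simp)]
      simp only [pvRunLens, pvCRuns_cons]
      simp [Nat.add_comm]
    · rw [List.takeWhile_cons_of_neg (by simpa using ha),
        List.dropWhile_cons_of_neg (by simpa using ha)]
      simp only [List.length_nil, Nat.add_zero, List.mem_cons]
      constructor
      · rintro (rfl | h)
        · omega
        · exact h
      · intro h; right; exact h

theorem pvReps_eq (l : List String) : ∀ prev : String,
    pvReps prev l = (pvCRuns (l.dropWhile (fun x => x = prev))).map (fun p => p.1) := by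
  induction l with
  | nil => intro prev; simp [pvReps, pvCRuns]
  | cons a t ih =>
    intro prev
    by_cases ha : a = prev
    · rw [pvReps, if_pos ha, ih prev, List.dropWhile_cons_of_pos (by simpa using ha)]
    · rw [pvReps, if_neg ha, List.dropWhile_cons_of_neg (by simpa using ha), pvCRuns_cons]
      simp only [List.map_cons]
      rw [ih a]

theorem pvReps_subset (l : List String) : ∀ (prev : String), ∀ s ∈ pvReps prev l, s ∈ l := by
  induction l with
  | nil => intro prev s hs; simp [pvReps] at hs
  | cons a t ih =>
    intro prev s hs
    rw [pvReps] at hs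
    split at hs
    · exact List.mem_cons_of_mem _ (ih prev s hs)
    · rcases List.mem_cons.mp hs with rfl | hs
      · exact List.mem_cons_self
      · exact List.mem_cons_of_mem _ (ih a s hs)

-- ---------- the two bit tables agree with pvNibNat on the domain ----------

set_option maxRecDepth 10000 in
theorem pvHex2bin_getD (k : Nat) (h : k < 128) : pvHex2bin.getD k "" = pvNibNat k := by
  have hall : ((List.range 128).all fun k => decide (pvHex2bin.getD k "" = pvNibNat k)) = true := by
    decide
  exact of_decide_eq_true (List.all_eq_true.mp hall k (List.mem_range.mpr h))

theorem pvChar_toNat_inj (c d : Char) (h : c.toNat = d.toNat) : c = d := by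
  exact Char.ext (UInt32.toNat_inj.mp h)

theorem pvLookupA (c : Char) (h : pvDomChar c = true) :
    PySem.List.pyGetD pvHex2bin (c.toNat : Int) "" = pvNibNat c.toNat := by
  have hlt : c.toNat < 128 := by
    unfold pvDomChar at h
    simp only [Bool.or_eq_true, Bool.and_eq_true, decide_eq_true_eq, beq_iff_eq] at h
    omega
  rw [PySem.List.pyGetD_natCast]
  exact pvHex2bin_getD _ hlt

theorem pvLookupB (c : Char) (h : pvDomChar c = true) :
    PySem.Dict.getD pvTable c "" = pvNibNat c.toNat := by
  by_cases h0 : c = '0'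
  · subst h0; decide
  by_cases h1 : c = '1'
  · subst h1; decide
  by_cases h2 : c = '2'
  · subst h2; decide
  by_cases h3 : c = '3'
  · subst h3; decide
  by_cases h4 : c = '4'
  · subst h4; decide
  by_cases h5 : c = '5'
  · subst h5; decide
  by_cases h6 : c = '6'
  · subst h6; decide
  by_cases h7 : c = '7'
  · subst h7; decide
  by_cases h8 : c = '8'
  · subst h8; decide
  by_cases h9 : c = '9'
  · subst h9; decide
  by_cases h10 : c = 'A'
  · subst h10; decide
  by_cases h11 : c = 'B'
  · subst h11; decide
  by_cases h12 : c = 'C'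
  · subst h12; decide
  by_cases h13 : c = 'D'
  · subst h13; decide
  by_cases h14 : c = 'E'
  · subst h14; decide
  by_cases h15 : c = 'F'
  · subst h15; decide
  have hT : pvTable = PySem.Dict.mk [('0', "0000"), ('1', "0001"), ('2', "0010"), ('3', "0011"), ('4', "0100"), ('5', "0101"), ('6', "0110"), ('7', "0111"), ('8', "1000"), ('9', "1001"), ('A', "1010"), ('B', "1011"), ('C', "1100"), ('D', "1101"), ('E', "1110"), ('F', "1111")] := by decide
  have e0 : ('0' == c) = false := beq_eq_false_iff_ne.mpr (Ne.symm h0)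
  have e1 : ('1' == c) = false := beq_eq_false_iff_ne.mpr (Ne.symm h1)
  have e2 : ('2' == c) = false := beq_eq_false_iff_ne.mpr (Ne.symm h2)
  have e3 : ('3' == c) = false := beq_eq_false_iff_ne.mpr (Ne.symm h3)
  have e4 : ('4' == c) = false := beq_eq_false_iff_ne.mpr (Ne.symm h4)
  have e5 : ('5' == c) = false := beq_eq_false_iff_ne.mpr (Ne.symm h5)
  have e6 : ('6' == c) = false := beq_eq_false_iff_ne.mpr (Ne.symm h6)
  have e7 : ('7' == c) = false := beq_eq_false_iff_ne.mpr (Ne.symm h7)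
  have e8 : ('8' == c) = false := beq_eq_false_iff_ne.mpr (Ne.symm h8)
  have e9 : ('9' == c) = false := beq_eq_false_iff_ne.mpr (Ne.symm h9)
  have e10 : ('A' == c) = false := beq_eq_false_iff_ne.mpr (Ne.symm h10)
  have e11 : ('B' == c) = false := beq_eq_false_iff_ne.mpr (Ne.symm h11)
  have e12 : ('C' == c) = false := beq_eq_false_iff_ne.mpr (Ne.symm h12)
  have e13 : ('D' == c) = false := beq_eq_false_iff_ne.mpr (Ne.symm h13)
  have e14 : ('E' == c) = false := beq_eq_false_iff_ne.mpr (Ne.symm h14)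
  have e15 : ('F' == c) = false := beq_eq_false_iff_ne.mpr (Ne.symm h15)
  have n0 : c.toNat ≠ 48 := fun hh => h0 (pvChar_toNat_inj c '0' hh)
  have n1 : c.toNat ≠ 49 := fun hh => h1 (pvChar_toNat_inj c '1' hh)
  have n2 : c.toNat ≠ 50 := fun hh => h2 (pvChar_toNat_inj c '2' hh)
  have n3 : c.toNat ≠ 51 := fun hh => h3 (pvChar_toNat_inj c '3' hh)
  have n4 : c.toNat ≠ 52 := fun hh => h4 (pvChar_toNat_inj c '4' hh)
  have n5 : c.toNat ≠ 53 := fun hh => h5 (pvChar_toNat_inj c '5' hh)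
  have n6 : c.toNat ≠ 54 := fun hh => h6 (pvChar_toNat_inj c '6' hh)
  have n7 : c.toNat ≠ 55 := fun hh => h7 (pvChar_toNat_inj c '7' hh)
  have n8 : c.toNat ≠ 56 := fun hh => h8 (pvChar_toNat_inj c '8' hh)
  have n9 : c.toNat ≠ 57 := fun hh => h9 (pvChar_toNat_inj c '9' hh)
  have n10 : c.toNat ≠ 65 := fun hh => h10 (pvChar_toNat_inj c 'A' hh)
  have n11 : c.toNat ≠ 66 := fun hh => h11 (pvChar_toNat_inj c 'B' hh)
  have n12 : c.toNat ≠ 67 := fun hh => h12 (pvChar_toNat_inj c 'C' hh)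
  have n13 : c.toNat ≠ 68 := fun hh => h13 (pvChar_toNat_inj c 'D' hh)
  have n14 : c.toNat ≠ 69 := fun hh => h14 (pvChar_toNat_inj c 'E' hh)
  have n15 : c.toNat ≠ 70 := fun hh => h15 (pvChar_toNat_inj c 'F' hh)
  rw [hT]
  simp [PySem.Dict.getD, PySem.Dict.get?, e0, e1, e2, e3, e4, e5, e6, e7, e8, e9, e10, e11, e12, e13, e14, e15, pvNibNat, n0, n1, n2, n3, n4, n5, n6, n7, n8, n9, n10, n11, n12, n13, n14, n15]

theorem pvBitsB_eq (s : String) (h : pvDomStr s = true) : pvBitsB s = pvSpecBits s := by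
  unfold pvBitsB pvSpecBits
  have hall : ∀ c ∈ s.toList, pvDomChar c = true := by
    simpa [pvDomStr, List.all_eq_true] using h
  generalize s.toList = l at hall ⊢
  induction l with
  | nil => simp
  | cons c t ih =>
    rw [List.flatMap_cons, List.flatMap_cons, pvLookupB c (hall c List.mem_cons_self),
      ih (fun d hd => hall d (List.mem_cons_of_mem _ hd))]

-- ---------- the horizontal (bit) scan ----------

theorem pvHScan (bits : List Char) : ∀ (b : List Int) (pc : Option Char) (cnt : Nat),
    pvGood b →
    ∃ (b' : List Int) (pc' : Option Char) (cnt' : Nat),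
      bits.foldl pvStepBit (b, pc, (cnt : Int)) = (b', pc', (cnt' : Int)) ∧
      b'.length = b.length ∧ pvGood b' ∧
      (∀ j, 1 ≤ j →
        ((pvBump b' cnt').getD j 0 ≠ 0 ↔
          b.getD j 0 ≠ 0 ∨ (j ∈ pvTail pc cnt (bits.map some) ∧ j < b.length))) := by
  induction bits with
  | nil =>
    intro b pc cnt hg
    refine ⟨b, pc, cnt, rfl, rfl, hg, ?_⟩
    intro j hj
    rw [pvBump_ne_zero b cnt j hg]
    simp only [List.map_nil, pvTail_nil, List.mem_singleton]
    constructor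
    · rintro (hb | ⟨rfl, hlt⟩)
      · left; exact hb
      · right; exact ⟨rfl, hlt⟩
    · rintro (hb | ⟨rfl, hlt⟩)
      · left; exact hb
      · right; exact ⟨rfl, hlt⟩
  | cons c bits ih =>
    intro b pc cnt hg
    rw [List.foldl_cons]
    by_cases hc : (some c : Option Char) = pc
    · have hstep : pvStepBit (b, pc, (cnt : Int)) c = (b, pc, ((cnt + 1 : Nat) : Int)) := by
        simp [pvStepBit, hc]
      rw [hstep]
      obtain ⟨b', pc', cnt', heq, hlen, hgood, hchar⟩ := ih b pc (cnt + 1) hg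
      refine ⟨b', pc', cnt', heq, hlen, hgood, ?_⟩
      intro j hj
      rw [hchar j hj, List.map_cons, pvTail_cons, if_pos hc]
    · have hstep : pvStepBit (b, pc, (cnt : Int)) c = (pvBump b cnt, some c, ((1 : Nat) : Int)) := by
        simp [pvStepBit, hc]
      rw [hstep]
      obtain ⟨b', pc', cnt', heq, hlen, hgood, hchar⟩ :=
        ih (pvBump b cnt) (some c) 1 (pvGood_pvBump b cnt hg)
      refine ⟨b', pc', cnt', heq, by rw [hlen, pvLength_pvBump], hgood, ?_⟩
      intro j hj
      rw [hchar j hj, pvBump_ne_zero b cnt j hg, List.map_cons, pvTail_cons, if_neg hc,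
        pvLength_pvBump]
      simp only [List.mem_cons]
      constructor
      · rintro ((hb | ⟨rfl, hlt⟩) | ⟨hm, hlt⟩)
        · left; exact hb
        · right; exact ⟨Or.inl rfl, hlt⟩
        · right; exact ⟨Or.inr hm, hlt⟩
      · rintro (hb | ⟨rfl | hm, hlt⟩)
        · left; left; exact hb
        · left; right; exact ⟨rfl, hlt⟩
        · right; exact ⟨hm, hlt⟩

theorem pvScanRow_eq (s : String) (b : List Int) (h : pvDomStr s = true) :
    pvScanRow b s = (pvSpecBits s).foldl pvStepBit (b, none, ((0 : Nat) : Int)) := by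
  unfold pvScanRow pvSpecBits
  rw [List.foldl_flatMap]
  simp only [Nat.cast_zero]
  have hall : ∀ c ∈ s.toList, pvDomChar c = true := by
    simpa [pvDomStr, List.all_eq_true] using h
  apply PySem.List.foldl_congr_mem
  intro acc x hx
  rw [pvLookupA x (hall x hx)]

-- one full row expansion, final bump included
theorem pvRowExpand (s : String) (b : List Int) (hg : pvGood b) (hd : pvDomStr s = true) :
    ∃ (b' : List Int) (pc' : Option Char) (cnt' : Nat),
      pvScanRow b s = (b', pc', (cnt' : Int)) ∧
      (pvBump b' cnt').length = b.length ∧ pvGood (pvBump b' cnt') ∧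
      (∀ j, 1 ≤ j →
        ((pvBump b' cnt').getD j 0 ≠ 0 ↔
          b.getD j 0 ≠ 0 ∨ (j ∈ pvRunLens (pvSpecBits s) ∧ j < b.length))) := by
  obtain ⟨b', pc', cnt', heq, hlen, hgood, hchar⟩ := pvHScan (pvSpecBits s) b none 0 hg
  refine ⟨b', pc', cnt', by rw [pvScanRow_eq s b hd]; exact heq,
    by rw [pvLength_pvBump]; exact hlen, pvGood_pvBump _ _ hgood, ?_⟩
  intro j hj
  rw [hchar j hj]
  have htail : pvTail (none : Option Char) 0 ((pvSpecBits s).map some)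
      = 0 :: pvRunLens (pvSpecBits s) := by
    rw [pvTail_eq]
    have hpred : ((fun x => decide (x = (none : Option Char))) ∘ some) = fun _ => false := by
      funext x; simp
    have h1 : ((pvSpecBits s).map some).takeWhile (fun x => x = (none : Option Char)) = [] := by
      rw [List.takeWhile_map, hpred]
      cases pvSpecBits s <;> simp [List.takeWhile]
    have h2 : ((pvSpecBits s).map some).dropWhile (fun x => x = (none : Option Char))
        = (pvSpecBits s).map some := by
      rw [List.dropWhile_map, hpred]
      cases pvSpecBits s <;> simp [List.dropWhile]
    rw [h1, h2, pvRunLens_map_inj some (fun a b hab => Option.some.inj hab)]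
    simp
  rw [htail]
  have hj0 : ¬ (j = 0) := by omega
  simp only [List.mem_cons, hj0, false_or]

-- ---------- the vertical (row) scan ----------

-- A's loop body with the index lookup abstracted away
def pvRowAbs (st : List Int × String × Int) (row : String) : List Int × String × Int :=
  if row = st.2.1 then (st.1, st.2.1, st.2.2 + 1)
  else
    let r := pvScanRow (pvBump st.1 st.2.2.toNat) row
    (pvBump r.1 r.2.2.toNat, row, 1)

theorem pvStepRow_eq_rowAbs (matrix_hex : List String) (st : List Int × String × Int) (i : Int) :
    pvStepRow matrix_hex st i = pvRowAbs st (PySem.List.pyGetD matrix_hex i "") := rfl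

theorem pvVScan (rows : List String) : ∀ (b : List Int) (prev : String) (cnt : Nat),
    pvGood b →
    (∀ s ∈ rows, pvDomStr s = true) →
    (∀ s ∈ rows, ∀ r ∈ pvRunLens (pvSpecBits s), r < b.length) →
    ∃ (b' : List Int) (prev' : String) (cnt' : Nat),
      rows.foldl pvRowAbs (b, prev, (cnt : Int)) = (b', prev', (cnt' : Int)) ∧
      b'.length = b.length ∧ pvGood b' ∧
      (∀ j, 1 ≤ j →
        ((pvBump b' cnt').getD j 0 ≠ 0 ↔
          b.getD j 0 ≠ 0 ∨ (j ∈ pvTail prev cnt rows ∧ j < b.length) ∨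
            ∃ s ∈ pvReps prev rows, j ∈ pvRunLens (pvSpecBits s))) := by
  induction rows with
  | nil =>
    intro b prev cnt hg hdm hbd
    refine ⟨b, prev, cnt, rfl, rfl, hg, ?_⟩
    intro j hj
    rw [pvBump_ne_zero b cnt j hg]
    simp only [pvTail_nil, pvReps, List.mem_singleton, List.not_mem_nil]
    constructor
    · rintro (hb | ⟨rfl, hlt⟩)
      · left; exact hb
      · right; left; exact ⟨rfl, hlt⟩
    · rintro (hb | ⟨rfl, hlt⟩ | ⟨s, hs, _⟩)
      · left; exact hb
      · right; exact ⟨rfl, hlt⟩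
      · exact absurd hs (by simp)
  | cons a rows ih =>
    intro b prev cnt hg hdm hbd
    rw [List.foldl_cons]
    by_cases hc : a = prev
    · have hstep : pvRowAbs (b, prev, (cnt : Int)) a = (b, prev, ((cnt + 1 : Nat) : Int)) := by
        simp [pvRowAbs, hc]
      rw [hstep]
      obtain ⟨b', prev', cnt', heq, hlen, hgood, hchar⟩ :=
        ih b prev (cnt + 1) hg (fun s hs => hdm s (List.mem_cons_of_mem _ hs))
          (fun s hs => hbd s (List.mem_cons_of_mem _ hs))
      refine ⟨b', prev', cnt', heq, hlen, hgood, ?_⟩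
      intro j hj
      rw [hchar j hj, pvTail_cons, if_pos hc, pvReps_cons, if_pos hc]
    · have hstep : pvRowAbs (b, prev, (cnt : Int)) a
          = (pvBump (pvScanRow (pvBump b cnt) a).1 (pvScanRow (pvBump b cnt) a).2.2.toNat,
              a, ((1 : Nat) : Int)) := by
        simp [pvRowAbs, hc]
      rw [hstep]
      obtain ⟨b2, pc2, k2, hseq, hlen2, hgood2, hchar2⟩ :=
        pvRowExpand a (pvBump b cnt) (pvGood_pvBump b cnt hg) (hdm a List.mem_cons_self)
      rw [hseq]
      simp only [Int.toNat_natCast]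
      have hlenB2 : (pvBump b2 k2).length = b.length := by
        rw [hlen2, pvLength_pvBump]
      obtain ⟨b', prev', cnt', heq, hlen, hgood, hchar⟩ :=
        ih (pvBump b2 k2) a 1 hgood2 (fun s hs => hdm s (List.mem_cons_of_mem _ hs))
          (fun s hs r hr => by rw [hlenB2]; exact hbd s (List.mem_cons_of_mem _ hs) r hr)
      refine ⟨b', prev', cnt', heq, by rw [hlen, hlenB2], hgood, ?_⟩
      intro j hj
      rw [hchar j hj, pvTail_cons, if_neg hc, pvReps_cons, if_neg hc]
      have h2 := hchar2 j hj
      rw [pvBump_ne_zero b cnt j hg, pvLength_pvBump] at h2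
      rw [h2, hlenB2]
      have hja : j ∈ pvRunLens (pvSpecBits a) → j < b.length :=
        fun hm => hbd a List.mem_cons_self j hm
      simp only [List.mem_cons]
      constructor
      · rintro (((hb | ⟨rfl, hlt⟩) | ⟨hm, hlt⟩) | ⟨ht, hlt⟩ | ⟨s, hs, hm⟩)
        · left; exact hb
        · right; left; exact ⟨Or.inl rfl, hlt⟩
        · right; right; exact ⟨a, Or.inl rfl, hm⟩
        · right; left; exact ⟨Or.inr ht, hlt⟩
        · right; right; exact ⟨s, Or.inr hs, hm⟩
      · rintro (hb | ⟨rfl | ht, hlt⟩ | ⟨s, rfl | hs, hm⟩)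
        · left; left; left; exact hb
        · left; left; right; exact ⟨rfl, hlt⟩
        · right; left; exact ⟨ht, hlt⟩
        · left; right; exact ⟨hm, hja hm⟩
        · right; right; exact ⟨s, hs, hm⟩

-- ---------- membership in pvCRuns vs membership in the list ----------

theorem pvMem_to_cruns {α : Type} [DecidableEq α] (l : List α) :
    ∀ s ∈ l, ∃ q ∈ pvCRuns l, q.1 = s := by
  induction l using pvCRuns_induct with
  | h0 => simp
  | h1 a t ih =>
    intro s hs
    rw [pvCRuns_cons]
    by_cases hsa : s = a
    · exact ⟨(a, 1 + (t.takeWhile (fun x => x = a)).length), List.mem_cons_self, hsa.symm⟩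
    · have hst : s ∈ t := by
        rcases List.mem_cons.mp hs with rfl | h
        · exact absurd rfl hsa
        · exact h
      rw [← List.takeWhile_append_dropWhile (p := fun x => decide (x = a)) (l := t)] at hst
      rcases List.mem_append.mp hst with h1 | h2
      · exact absurd (by simpa using List.mem_takeWhile_imp h1) hsa
      · obtain ⟨q, hq, hqe⟩ := ih s h2
        exact ⟨q, List.mem_cons_of_mem _ hq, hqe⟩

theorem pvMem_cruns_to_reps (rows : List String) (q : String × Nat) (hq : q ∈ pvCRuns rows) :
    q.1 = "" ∨ q.1 ∈ pvReps "" rows := by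
  rw [pvReps_eq]
  cases rows with
  | nil => rw [pvCRuns_nil] at hq; simp at hq
  | cons a t =>
    by_cases ha : a = ""
    · subst ha
      rw [pvCRuns_cons] at hq
      rcases List.mem_cons.mp hq with rfl | hq
      · left; rfl
      · right
        rw [List.dropWhile_cons_of_pos (by simp)]
        exact List.mem_map.mpr ⟨q, hq, rfl⟩
    · right
      rw [List.dropWhile_cons_of_neg (by simpa using ha)]
      exact List.mem_map.mpr ⟨q, hq, rfl⟩

theorem pvSpecBits_empty : pvSpecBits "" = [] := by decide

theorem pvRunLens_nil {α : Type} [DecidableEq α] : pvRunLens ([] : List α) = [] := by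
  simp [pvRunLens, pvCRuns_nil]

-- ---------- change positions characterize run lengths (the heart of B) ----------

theorem pvDropWhile_head {α : Type} (p : α → Bool) :
    ∀ (t : List α) (b : α), (t.dropWhile p)[0]? = some b → p b = false := by
  intro t
  induction t with
  | nil => intro b hb; simp at hb
  | cons a t ih =>
    intro b hb
    by_cases ha : p a
    · rw [List.dropWhile_cons_of_pos ha] at hb
      exact ih b hb
    · rw [List.dropWhile_cons_of_neg ha] at hb
      simp only [List.getElem?_cons_zero, Option.some.injEq] at hb
      subst hb
      simpa using ha

-- d divides every change position (and the length) iff d divides every run length: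
-- run lengths are consecutive differences of the change positions.
theorem pvBnd_iff {α : Type} [DecidableEq α] (l : List α) (d : Nat) :
    (d ∣ l.length ∧ ∀ i : Nat, 1 ≤ i → i < l.length → l[i]? ≠ l[i - 1]? → d ∣ i)
      ↔ ∀ r ∈ pvRunLens l, d ∣ r := by
  induction l using pvCRuns_induct with
  | h0 =>
    simp [pvRunLens_nil]
  | h1 a t ih =>
    set tw := t.takeWhile (fun x => x = a) with htw
    set dw := t.dropWhile (fun x => x = a) with hdw
    set k := 1 + tw.length with hk
    have hsplit : a :: t = (a :: tw) ++ dw := by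
      simp [htw, hdw, List.takeWhile_append_dropWhile]
    have hlenfr : (a :: tw).length = k := by simp [hk, Nat.add_comm]
    have hlen : (a :: t).length = k + dw.length := by
      rw [hsplit, List.length_append, hlenfr]
    have helem : ∀ i < k, (a :: t)[i]? = some a := by
      intro i hi
      rw [hsplit, List.getElem?_append_left (by rw [hlenfr]; exact hi)]
      have hil : i < (a :: tw).length := by rw [hlenfr]; exact hi
      rw [List.getElem?_eq_getElem hil]
      congr 1
      have hmem := List.getElem_mem hil
      rcases List.mem_cons.mp hmem with h | h
      · exact h
      · simpa using List.mem_takeWhile_imp h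
    have hdwe : ∀ j, (a :: t)[k + j]? = dw[j]? := by
      intro j
      rw [hsplit, List.getElem?_append_right (by rw [hlenfr]; omega), hlenfr]
      congr 1
      omega
    have hrl : pvRunLens (a :: t) = k :: pvRunLens dw := by
      simp only [pvRunLens, pvCRuns_cons, List.map_cons]
      rfl
    rw [hrl]
    constructor
    · rintro ⟨hL, hB⟩
      have hdk : d ∣ k := by
        cases hdwnil : dw with
        | nil =>
          rw [hlen, hdwnil] at hL
          simpa using hL
        | cons b dw' =>
          have hb : (a :: t)[k]? = some b := by
            rw [show k = k + 0 from rfl, hdwe 0, hdwnil]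
            simp
          have hb1 : (a :: t)[k - 1]? = some a := helem (k - 1) (by omega)
          have hba : b ≠ a := by
            have := pvDropWhile_head (fun x => decide (x = a)) t b (by rw [← hdw, hdwnil]; simp)
            simpa using this
          refine hB k (by omega) (by rw [hlen, hdwnil]; simp) ?_
          rw [hb, hb1]
          simp [hba]
      have hrest : ∀ r ∈ pvRunLens dw, d ∣ r := by
        apply ih.mp
        constructor
        · have : d ∣ k + dw.length := by rw [← hlen]; exact hL
          exact (Nat.dvd_add_right hdk).mp this
        · intro j hj1 hj2 hne
          have hkj : d ∣ k + j := by
            refine hB (k + j) (by omega) (by rw [hlen]; omega) ?_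
            rw [hdwe j, show k + j - 1 = k + (j - 1) from by omega, hdwe (j - 1)]
            exact hne
          exact (Nat.dvd_add_right hdk).mp hkj
      intro r hr
      rcases List.mem_cons.mp hr with rfl | hr
      · exact hdk
      · exact hrest r hr
    · intro h
      have hdk : d ∣ k := h k List.mem_cons_self
      have hdw' := ih.mpr (fun r hr => h r (List.mem_cons_of_mem _ hr))
      refine ⟨by rw [hlen]; exact dvd_add hdk hdw'.1, ?_⟩
      intro i hi1 hi2 hne
      rcases lt_trichotomy i k with hik | hik | hik
      · exfalso
        apply hne
        rw [helem i hik, helem (i - 1) (by omega)]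
      · subst hik; exact hdk
      · have hj1 : 1 ≤ i - k := by omega
        have hj2 : i - k < dw.length := by rw [hlen] at hi2; omega
        have : d ∣ i - k := by
          apply hdw'.2 (i - k) hj1 hj2
          rw [show i = k + (i - k) from by omega, hdwe] at hne
          rw [show k + (i - k) - 1 = k + (i - k - 1) from by omega, hdwe] at hne
          exact hne
        have := dvd_add hdk this
        rwa [show k + (i - k) = i from by omega] at this

-- ---------- B's boundary fold over one sequence ----------

theorem pvRowFoldChar {α : Type} [DecidableEq α] (l : List α) (dflt : α) (g : Nat) :
    ∃ g' : Nat,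
      (PySem.List.pyRange 1 (l.length : Int) 1).foldl
          (fun x i =>
            if PySem.List.pyGetD l i dflt ≠ PySem.List.pyGetD l (i - 1) dflt then pvGcd x i
            else x)
          (pvGcd (g : Int) (l.length : Int)) = (g' : Int)
      ∧ ∀ d : Nat, (d ∣ g' ↔ d ∣ g ∧ ∀ r ∈ pvRunLens l, d ∣ r) := by
  set m := l.length with hm
  have hstart : pvGcd (g : Int) (m : Int) = ((Nat.gcd g m : Nat) : Int) := by
    simp [pvGcd, Int.gcd_natCast_natCast]
  set P : Int → Prop :=
    fun i => PySem.List.pyGetD l i dflt ≠ PySem.List.pyGetD l (i - 1) dflt with hP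
  set L : List Nat := (List.range (m - 1)).map (fun k => 1 + k) with hL
  have hrange : PySem.List.pyRange 1 (m : Int) 1 = L.map (fun k : Nat => (k : Int)) := by
    rw [PySem.List.pyRange_one 1 (m : Int), hL]
    rw [show ((m : Int) - 1).toNat = m - 1 from by omega]
    rw [List.map_map]
    apply List.map_congr_left
    intro k _
    simp only [Function.comp_apply]
    push_cast
    ring
  refine ⟨(L.filter (fun k : Nat => decide (P (↑k : Int)))).foldl Nat.gcd (Nat.gcd g m), ?_, ?_⟩
  · rw [hstart, hrange]
    exact pvFoldl_gcd_if P L (Nat.gcd g m)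
  · intro d
    rw [pvDvd_foldl_gcd, Nat.dvd_gcd_iff]
    have hmemL : ∀ x : Nat, x ∈ L ↔ 1 ≤ x ∧ x < m := by
      intro x
      rw [hL]
      simp only [List.mem_map, List.mem_range]
      constructor
      · rintro ⟨j, hj, rfl⟩; omega
      · rintro ⟨h1, h2⟩; exact ⟨x - 1, by omega, by omega⟩
    have hcond : ∀ x : Nat, 1 ≤ x → x < m → (P (↑x : Int) ↔ l[x]? ≠ l[x - 1]?) := by
      intro x h1 h2
      show (PySem.List.pyGetD l (↑x : Int) dflt ≠ PySem.List.pyGetD l ((↑x : Int) - 1) dflt)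
        ↔ l[x]? ≠ l[x - 1]?
      have hx1 : ((x : Int) - 1) = ((x - 1 : Nat) : Int) := by omega
      rw [hx1, PySem.List.pyGetD_natCast, PySem.List.pyGetD_natCast]
      rw [List.getD_eq_getElem l dflt (by omega), List.getD_eq_getElem l dflt (by omega)]
      rw [List.getElem?_eq_getElem (show x < l.length from by omega),
        List.getElem?_eq_getElem (show x - 1 < l.length from by omega)]
      simp
    have hmid : ((∀ x ∈ L.filter (fun k : Nat => decide (P (↑k : Int))), d ∣ x) ↔
        ∀ i : Nat, 1 ≤ i → i < m → l[i]? ≠ l[i - 1]? → d ∣ i) := by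
      constructor
      · intro h i h1 h2 hne
        exact h i (List.mem_filter.mpr ⟨(hmemL i).mpr ⟨h1, h2⟩,
          decide_eq_true ((hcond i h1 h2).mpr hne)⟩)
      · intro h x hx
        obtain ⟨hxL, hxP⟩ := List.mem_filter.mp hx
        obtain ⟨h1, h2⟩ := (hmemL x).mp hxL
        exact h x h1 h2 ((hcond x h1 h2).mp (of_decide_eq_true hxP))
    rw [hmid]
    rw [show (d ∣ g ∧ d ∣ m) ∧ (∀ i : Nat, 1 ≤ i → i < m → l[i]? ≠ l[i - 1]? → d ∣ i)
        ↔ d ∣ g ∧ (d ∣ l.length ∧ ∀ i : Nat, 1 ≤ i → i < l.length → l[i]? ≠ l[i - 1]? → d ∣ i)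
      from by rw [← hm]; tauto]
    rw [pvBnd_iff]

-- ---------- B's outer fold over the set of rows ----------

theorem pvOuterFold (S : List String) : ∀ g : Nat,
    ∃ g' : Nat,
      S.foldl
          (fun x row =>
            (PySem.List.pyRange 1 ((pvBitsB row).length : Int) 1).foldl
              (fun x i =>
                if PySem.List.pyGetD (pvBitsB row) i ' '
                    ≠ PySem.List.pyGetD (pvBitsB row) (i - 1) ' ' then pvGcd x i
                else x)
              (pvGcd x ((pvBitsB row).length : Int)))
          (g : Int) = (g' : Int)
      ∧ ∀ d : Nat, (d ∣ g' ↔ d ∣ g ∧ ∀ s ∈ S, ∀ r ∈ pvRunLens (pvBitsB s), d ∣ r) := by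
  induction S with
  | nil =>
    intro g
    exact ⟨g, rfl, by simp⟩
  | cons s T ih =>
    intro g
    obtain ⟨g1, he1, hc1⟩ := pvRowFoldChar (pvBitsB s) ' ' g
    obtain ⟨g', he', hc'⟩ := ih g1
    refine ⟨g', ?_, ?_⟩
    · rw [List.foldl_cons, he1, he']
    · intro d
      rw [hc' d, hc1 d]
      constructor
      · rintro ⟨⟨h1, h2⟩, h3⟩
        exact ⟨h1, fun t ht => by
          rcases List.mem_cons.mp ht with rfl | ht
          exacts [h2, h3 t ht]⟩
      · rintro ⟨h1, h2⟩
        exact ⟨⟨h1, h2 s List.mem_cons_self⟩, fun t ht => h2 t (List.mem_cons_of_mem _ ht)⟩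

-- ===== VERDICT (by name: the statement is the Claim_ definition above) =====
theorem find_max_compression_factor_spec : Claim_equal_find_max_compression_factor := by
  intro n matrix_hex hdom hpre
  obtain ⟨hn, hlen, hbd⟩ := hpre
  unfold Spec_find_max_compression_factor
  have hdomm : ∀ s ∈ matrix_hex, pvDomStr s = true := by
    unfold Dom_find_max_compression_factor at hdom
    simp only [Bool.and_eq_true, List.all_eq_true] at hdom
    exact fun s hs => hdom.2 s hs
  have hrl : (matrix_hex.take n.toNat).length = n.toNat := by
    rw [List.length_take]; omega
  have hdrows : ∀ s ∈ matrix_hex.take n.toNat, pvDomStr s = true :=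
    fun s hs => hdomm s (List.mem_of_mem_take hs)
  set R := matrix_hex.take n.toNat with hR
  -- A's main loop over range(n) is the fold of pvRowAbs over the first n rows
  have hA1 : (PySem.List.pyRange 0 n 1).foldl (pvStepRow matrix_hex)
        (List.replicate (n + 1).toNat 0, "", (0 : Int))
      = R.foldl pvRowAbs
          (List.replicate (n + 1).toNat 0, "", ((0 : Nat) : Int)) := by
    rw [PySem.List.foldl_congr_mem _ _
      (fun st i => pvRowAbs st (PySem.List.pyGetD R i ""))
      _ ?hcg]
    case hcg =>
      intro st i hi
      have hmem := (PySem.List.mem_pyRange_one).mp hi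
      rw [pvStepRow_eq_rowAbs]
      congr 1
      rw [PySem.List.pyGetD_eq_getElem _ "" hmem.1
        (by exact_mod_cast lt_of_lt_of_le hmem.2 hlen)]
      rw [PySem.List.pyGetD_eq_getElem _ "" hmem.1 (by rw [hrl]; omega)]
      simp only [hR, List.getElem_take]
    rw [show n = (R.length : Int) from by rw [hrl]; omega]
    exact PySem.List.foldl_pyRange_zero_pyGetD' _ "" pvRowAbs _
  obtain ⟨bF, prevF, cntF, heqF, hlenF, hgoodF, hcharF⟩ :=
    pvVScan R (List.replicate (n + 1).toNat 0) "" 0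
      (pvGood_replicate _) hdrows
      (fun s hs r hr => by
        have := hbd s hs r hr
        simp only [List.length_replicate]
        omega)
  -- value of A as a Nat gcd fold over the nonzero bucket indices
  have hAval : find_max_compression_factor n matrix_hex
      = ((((List.range n.toNat).map (fun k => 1 + k)).filter
            (fun k : Nat =>
              decide (PySem.List.pyGetD (pvBump bF cntF) (↑k : Int) 0 ≠ 0))).foldl
            Nat.gcd 0 : Nat) := by
    simp only [find_max_compression_factor]
    rw [hA1, heqF]
    simp only [Int.toNat_natCast]
    rw [PySem.List.pyRange_one 1 (n + 1)]
    rw [show (n + 1 - 1).toNat = n.toNat from by omega]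
    have hmap : (List.range n.toNat).map (fun k : Nat => (1 : Int) + ↑k)
        = ((List.range n.toNat).map (fun k => 1 + k)).map (fun k : Nat => (k : Int)) := by
      rw [List.map_map]
      apply List.map_congr_left
      intro k _
      simp only [Function.comp_apply]
      push_cast
      ring
    rw [hmap]
    exact pvFoldl_whileGcd_filter
      (fun v : Int => PySem.List.pyGetD (pvBump bF cntF) v 0 ≠ 0) _ 0
  -- the bucket characterization with the all-zero initial array
  have hchar' : ∀ k, 1 ≤ k → ((pvBump bF cntF).getD k 0 ≠ 0 ↔
      (k ∈ pvTail "" 0 R ∧ k < (n + 1).toNat) ∨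
        ∃ s ∈ pvReps "" R, k ∈ pvRunLens (pvSpecBits s)) := by
    intro k hk
    rw [hcharF k hk, pvGetD_replicate_zero, List.length_replicate]
    simp
  -- divisibility characterization of A's value
  set NA : Nat := (((List.range n.toNat).map (fun k => 1 + k)).filter
      (fun k : Nat =>
        decide (PySem.List.pyGetD (pvBump bF cntF) (↑k : Int) 0 ≠ 0))).foldl Nat.gcd 0
    with hNA
  have hmemA : ∀ k : Nat, (k ∈ ((List.range n.toNat).map (fun k => 1 + k)).filter
        (fun k : Nat => decide (PySem.List.pyGetD (pvBump bF cntF) (↑k : Int) 0 ≠ 0))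
      ↔ (1 ≤ k ∧ k ≤ n.toNat ∧ (pvBump bF cntF).getD k 0 ≠ 0)) := by
    intro k
    simp only [List.mem_filter, List.mem_map, List.mem_range, PySem.List.pyGetD_natCast,
      decide_eq_true_eq]
    constructor
    · rintro ⟨⟨m, hm, rfl⟩, hb⟩
      exact ⟨by omega, by omega, hb⟩
    · rintro ⟨h1, h2, hb⟩
      exact ⟨⟨k - 1, by omega, by omega⟩, hb⟩
  have hAchar : ∀ d : Nat, (d ∣ NA ↔
      (∀ r ∈ pvRunLens R, d ∣ r) ∧ ∀ s ∈ R, ∀ r ∈ pvRunLens (pvSpecBits s), d ∣ r) := by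
    intro d
    rw [hNA, pvDvd_foldl_gcd]
    constructor
    · rintro ⟨-, h⟩
      constructor
      · intro r hr
        have h1 : 1 ≤ r := pvRunLens_pos _ r hr
        have h2 : r ≤ n.toNat := by
          have := pvRunLens_le_length _ r hr
          omega
        refine h r ((hmemA r).mpr ⟨h1, h2, ?_⟩)
        exact (hchar' r h1).mpr (Or.inl ⟨(pvMem_pvTail_empty_str _ r h1).mpr hr, by omega⟩)
      · intro s hs r hr
        have h1 : 1 ≤ r := pvRunLens_pos _ r hr
        have h2 : r ≤ n.toNat := by
          have := hbd s hs r hr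
          omega
        obtain ⟨q, hq, hqe⟩ := pvMem_to_cruns R s hs
        rcases pvMem_cruns_to_reps R q hq with he | hrep
        · rw [hqe] at he
          rw [he, pvSpecBits_empty, pvRunLens_nil] at hr
          simp at hr
        · refine h r ((hmemA r).mpr ⟨h1, h2, ?_⟩)
          exact (hchar' r h1).mpr (Or.inr ⟨q.1, hrep, by rw [hqe]; exact hr⟩)
    · rintro ⟨hv, hh⟩
      refine ⟨dvd_zero d, ?_⟩
      intro k hk
      obtain ⟨h1, h2, hb⟩ := (hmemA k).mp hk
      rcases (hchar' k h1).mp hb with ⟨ht, -⟩ | ⟨s, hsrep, hm⟩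
      · exact hv k ((pvMem_pvTail_empty_str _ k h1).mp ht)
      · exact hh s (pvReps_subset R "" s hsrep) k hm
  -- B's value and its divisibility characterization
  have hnR : n = (R.length : Int) := by rw [hrl]; omega
  have hgetR : ∀ i : Int, 0 ≤ i → i < (R.length : Int) →
      PySem.List.pyGetD matrix_hex i "" = PySem.List.pyGetD R i "" := by
    intro i h0 h1
    have hiR : i < ((R.length : Nat) : Int) := h1
    rw [PySem.List.pyGetD_eq_getElem matrix_hex "" h0 (by rw [hrl] at hiR; omega),
      PySem.List.pyGetD_eq_getElem R "" h0 (by omega)]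
    simp only [hR, List.getElem_take]
  obtain ⟨g0, heg0, hcg0⟩ := pvRowFoldChar R "" 0
  obtain ⟨gF, hegF, hcgF⟩ := pvOuterFold (PySem.Set.ofList R) g0
  have hBval : find_max_compression_factor_alt n matrix_hex = (gF : Int) := by
    simp only [find_max_compression_factor_alt]
    rw [hnR]
    have h1 : (PySem.List.pyRange 1 (R.length : Int) 1).foldl
          (fun x i =>
            if PySem.List.pyGetD matrix_hex i "" ≠ PySem.List.pyGetD matrix_hex (i - 1) "" then
              pvGcd x i
            else x)
          (pvGcd 0 (R.length : Int))
        = (PySem.List.pyRange 1 (R.length : Int) 1).foldl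
          (fun x i =>
            if PySem.List.pyGetD R i "" ≠ PySem.List.pyGetD R (i - 1) "" then pvGcd x i
            else x)
          (pvGcd 0 (R.length : Int)) := by
      apply PySem.List.foldl_congr_mem
      intro acc i hi
      have hm := PySem.List.mem_pyRange_one.mp hi
      rw [hgetR i (by omega) hm.2, hgetR (i - 1) (by omega) (by omega)]
    have h2 : matrix_hex.take ((R.length : Int)).toNat = R := by
      rw [Int.toNat_natCast, hrl]
    rw [h1, h2]
    rw [show (0 : Int) = ((0 : Nat) : Int) from rfl, heg0, hegF]
  have hBchar : ∀ d : Nat, (d ∣ gF ↔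
      (∀ r ∈ pvRunLens R, d ∣ r) ∧ ∀ s ∈ R, ∀ r ∈ pvRunLens (pvSpecBits s), d ∣ r) := by
    intro d
    rw [hcgF d, hcg0 d]
    have hmemS : ∀ s : String, s ∈ PySem.Set.ofList R ↔ s ∈ R := by
      intro s; exact PySem.Set.mem_ofList R s
    constructor
    · rintro ⟨⟨-, hv⟩, hh⟩
      refine ⟨hv, ?_⟩
      intro s hs r hr
      have := hh s ((hmemS s).mpr hs)
      rw [pvBitsB_eq s (hdomm s (List.mem_of_mem_take (hR ▸ hs)))] at this
      exact this r hr
    · rintro ⟨hv, hh⟩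
      refine ⟨⟨dvd_zero d, hv⟩, ?_⟩
      intro s hs r hr
      have hsR : s ∈ R := (hmemS s).mp hs
      rw [pvBitsB_eq s (hdomm s (List.mem_of_mem_take (hR ▸ hsR)))] at hr
      exact hh s hsR r hr
  -- the two characterizations coincide, so the values are equal
  have hNAgF : NA = gF := by
    apply Nat.dvd_antisymm
    · exact (hBchar NA).mpr ((hAchar NA).mp dvd_rfl)
    · exact (hAchar gF).mpr ((hBchar gF).mp dvd_rfl)
  rw [hAval, hBval, hNAgF]
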